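-- pv_equiv track=rewrite | github.com/eliottcassidy2000/math | 04-computation/H_energy_decomposition.py | compute_H_and_alpha
-- ===== SOURCE A (Python) =====
-- from itertools import combinations
--
-- def compute_H_and_alpha(A, p):
--     """Compute H and alpha decomposition."""
--     n = p
--     # Enumerate ALL directed odd cycles
--     cycles = []
--     for k in range(3, n + 1, 2):
--         for subset in combinations(range(n), k):
--             verts = list(subset)
--             nc = count_directed_ham_cycles(A, verts)
--             for _ in range(nc):
--                 cycles.append(frozenset(subset))
--
--     # Build conflict graph
--     n_cyc = len(cycles)
--     adj = [[False] * n_cyc for _ in range(n_cyc)]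
--     for i in range(n_cyc):
--         for j in range(i + 1, n_cyc):
--             if cycles[i] & cycles[j]:
--                 adj[i][j] = True
--                 adj[j][i] = True
--
--     # Count independent sets by size
--     nbr = [0] * n_cyc
--     for i in range(n_cyc):
--         for j in range(n_cyc):
--             if adj[i][j]:
--                 nbr[i] |= (1 << j)
--
--     alpha = [0] * (n_cyc + 1)
--
--     def backtrack(v, mask, size):
--         alpha[size] += 1
--         for w in range(v + 1, n_cyc):
--             if not (mask & (1 << w)):
--                 backtrack(w, mask | nbr[w], size + 1)
--
--     if n_cyc <= 30:
--         backtrack(-1, 0, 0)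
--     else:
--         # Fallback: just count alpha_0, alpha_1, alpha_2
--         alpha[0] = 1
--         alpha[1] = n_cyc
--         alpha[2] = 0
--         for i in range(n_cyc):
--             for j in range(i + 1, n_cyc):
--                 if not adj[i][j]:
--                     alpha[2] += 1
--
--     H = sum(alpha[j] * (2**j) for j in range(len(alpha)))
--     return H, alpha, cycles
--
-- def count_directed_ham_cycles(A, verts):
--     k = len(verts)
--     if k == 3:
--         a, b, c = verts
--         fwd = A[a][b] * A[b][c] * A[c][a]
--         bwd = A[a][c] * A[c][b] * A[b][a]
--         return fwd + bwd
--     start = 0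
--     dp = {(1 << start, start): 1}
--     for mask in range(1, 1 << k):
--         if not (mask & (1 << start)):
--             continue
--         for v in range(k):
--             if not (mask & (1 << v)):
--                 continue
--             key = (mask, v)
--             if key not in dp or dp[key] == 0:
--                 continue
--             cnt = dp[key]
--             for w in range(k):
--                 if mask & (1 << w):
--                     continue
--                 if A[verts[v]][verts[w]]:
--                     nkey = (mask | (1 << w), w)
--                     dp[nkey] = dp.get(nkey, 0) + cnt
--     full = (1 << k) - 1
--     total = 0
--     for v in range(k):
--         if v == start:
--             continue
--         key = (full, v)
--         if key in dp and dp[key] > 0: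
--             if A[verts[v]][verts[start]]:
--                 total += dp[key]
--     return total
-- ===== SOURCE B (Python) =====
-- from itertools import combinations
--
-- def compute_H_and_alpha(A, p):
--     """Compute H and alpha decomposition."""
--     n = p
--     # Enumerate ALL directed odd cycles (same order: by size, then lexicographic)
--     cycles = [frozenset(subset)
--               for k in range(3, n + 1, 2)
--               for subset in combinations(range(n), k)
--               for _ in range(_count_ham(A, list(subset)))]
--
--     n_cyc = len(cycles)
--     # Conflict graph as adjacency lists (cycles sharing a vertex conflict)
--     nbrs = [[j for j in range(n_cyc) if j != i and cycles[i] & cycles[j]]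
--             for i in range(n_cyc)]
--
--     alpha = [0] * (n_cyc + 1)
--     if n_cyc <= 30:
--         # binary include/exclude recursion on the sorted list of available vertices
--         def go(avail, size):
--             if not avail:
--                 alpha[size] += 1
--                 return
--             m, rest = avail[0], avail[1:]
--             go(rest, size)                                        # exclude m
--             go([u for u in rest if u not in nbrs[m]], size + 1)   # include m
--         go(list(range(n_cyc)), 0)
--     else:
--         # truncated fallback: alpha_2 = (pairs) - (edges above the diagonal)
--         nonedges = 0
--         for i in range(n_cyc):
--             nonedges += (n_cyc - 1 - i) - sum(1 for u in nbrs[i] if u > i)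
--         alpha = [1, n_cyc, nonedges] + [0] * (n_cyc - 2)
--
--     # Horner evaluation of sum(alpha[j] * 2**j)
--     H = 0
--     for j in range(len(alpha) - 1, -1, -1):
--         H = 2 * H + alpha[j]
--     return H, alpha, cycles
--
-- def _count_ham(A, verts):
--     k = len(verts)
--     if k == 3:
--         a, b, c = verts
--         return A[a][b] * A[b][c] * A[c][a] + A[a][c] * A[c][b] * A[b][a]
--     start = 0
--     dp = {(1 << start, start): 1}
--     for mask in range(1, 1 << k):
--         if not (mask & (1 << start)):
--             continue
--         for v in range(k):
--             if not (mask & (1 << v)):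
--                 continue
--             key = (mask, v)
--             if key not in dp or dp[key] == 0:
--                 continue
--             cnt = dp[key]
--             for w in range(k):
--                 if mask & (1 << w):
--                     continue
--                 if A[verts[v]][verts[w]]:
--                     nkey = (mask | (1 << w), w)
--                     dp[nkey] = dp.get(nkey, 0) + cnt
--     full = (1 << k) - 1
--     total = 0
--     for v in range(k):
--         if v == start:
--             continue
--         key = (full, v)
--         if key in dp and dp[key] > 0:
--             if A[verts[v]][verts[start]]:
--                 total += dp[key]
--     return total
-- ===== Notes on version B (the rewrite author's own statement) =====
-- stated objective: alternative
-- what changed: The forward-index bitmask backtracking over the conflict graph is replaced by a binary include/exclude recursion on adjacency lists, the >30-cycle fallback counts non-edges by complement arithmetic on neighbour-list sizes instead of scanning an adjacency matrix, and H is evaluated by Horner's rule instead of summing alpha[j]*2**j.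
import Mathlib
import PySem

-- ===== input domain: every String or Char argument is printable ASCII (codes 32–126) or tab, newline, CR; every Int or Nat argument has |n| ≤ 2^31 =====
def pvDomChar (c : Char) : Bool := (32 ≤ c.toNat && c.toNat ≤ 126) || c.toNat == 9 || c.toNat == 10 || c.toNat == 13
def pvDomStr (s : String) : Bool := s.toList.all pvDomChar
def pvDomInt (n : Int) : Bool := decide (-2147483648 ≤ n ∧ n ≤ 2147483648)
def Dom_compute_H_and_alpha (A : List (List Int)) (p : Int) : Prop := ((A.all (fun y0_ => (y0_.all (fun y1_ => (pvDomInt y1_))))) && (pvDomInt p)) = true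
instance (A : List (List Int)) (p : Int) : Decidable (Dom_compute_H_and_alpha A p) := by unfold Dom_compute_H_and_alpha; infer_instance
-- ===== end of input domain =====

-- B replaces A's forward-index backtracking over bitmasks by a binary include/exclude
-- recursion on adjacency lists, counts the fallback's non-edges by complement arithmetic
-- instead of scanning the matrix, and evaluates H by Horner's rule; same results (objective: alternative).

-- ===== PORT A =====

-- itertools.combinations(l, k) in lexicographic order (library call in both Pythons)
def pvCombos : List Int → Nat → List (List Int)
  | _, 0 => [[]]
  | [], _ + 1 => []
  | x :: xs, k + 1 => (pvCombos xs k).map (fun s => x :: s) ++ pvCombos xs (k + 1)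

-- A[i][j]; Python raises IndexError out of range, which Pre_ excludes
def pvIdx (A : List (List Int)) (i j : Int) : Int :=
  PySem.List.pyGetD (PySem.List.pyGetD A i []) j 0

-- count_directed_ham_cycles, shared verbatim by both Pythons
def pvCountHam (A : List (List Int)) (verts : List Int) : Int :=
  let k := verts.length
  if k = 3 then
    let a := verts.getD 0 0
    let b := verts.getD 1 0
    let c := verts.getD 2 0
    pvIdx A a b * pvIdx A b c * pvIdx A c a + pvIdx A a c * pvIdx A c b * pvIdx A b a
  else
    let dp0 : PySem.Dict (Nat × Nat) Int := PySem.Dict.empty.insert (1 <<< 0, 0) 1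
    let dp := (List.range' 1 (2 ^ k - 1)).foldl (fun dp mask =>
      if mask &&& (1 <<< 0) = 0 then dp else
      (List.range k).foldl (fun dp v =>
        if mask &&& (1 <<< v) = 0 then dp else
        match dp.get? (mask, v) with
        | none => dp
        | some cnt =>
          if cnt = 0 then dp else
          (List.range k).foldl (fun dp w =>
            if mask &&& (1 <<< w) ≠ 0 then dp else
            if pvIdx A (verts.getD v 0) (verts.getD w 0) ≠ 0 then
              dp.modify (mask ||| (1 <<< w), w) 0 (· + cnt)
            else dp) dp) dp) dp0
    let full := 2 ^ k - 1
    (List.range k).foldl (fun total v =>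
      if v = 0 then total else
      match dp.get? (full, v) with
      | none => total
      | some c =>
        if c > 0 then
          (if pvIdx A (verts.getD v 0) (verts.getD 0 0) ≠ 0 then total + c else total)
        else total) 0

-- truthiness of 'frozenset & frozenset'
def pvInter (a b : List Int) : Bool := a.any (fun x => b.contains x)

-- adj[i][j] = True
def pvSet2 (adj : List (List Bool)) (i j : Nat) : List (List Bool) :=
  adj.modify i (fun row => row.set j true)

-- adj[i][j] lookup
def pvGetA (adj : List (List Bool)) (i j : Nat) : Bool := (adj.getD i []).getD j false

-- the 'for w in range(v+1, n_cyc)' loop of backtrack, with fuel = n_cyc - (v+1);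
-- the recursive call inlines backtrack's entry bump 'alpha[size] += 1'
def pvBTloop (nbr : List Nat) : Nat → Nat → Nat → Nat → List Int → List Int
  | 0, _, _, _, alpha => alpha
  | fuel + 1, w, mask, size, alpha =>
    pvBTloop nbr fuel (w + 1) mask size
      (if mask &&& (1 <<< w) = 0 then
        pvBTloop nbr fuel (w + 1) (mask ||| nbr.getD w 0) (size + 1)
          ((alpha.modify (size + 1) (· + 1)))
      else alpha)

def compute_H_and_alpha (A : List (List Int)) (p : Int) : Int × List Int × List (List Int) :=
  let n := p
  let cycles : List (List Int) :=
    (PySem.List.pyRange 3 (n + 1) 2).foldl (fun acc k =>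
      (pvCombos (PySem.List.pyRange 0 n 1) k.toNat).foldl (fun acc subset =>
        acc ++ List.replicate (pvCountHam A subset).toNat subset) acc) []
  let n_cyc := cycles.length
  let adj0 : List (List Bool) := List.replicate n_cyc (List.replicate n_cyc false)
  let adj := (List.range n_cyc).foldl (fun adj i =>
      (List.range' (i + 1) (n_cyc - (i + 1))).foldl (fun adj j =>
        if pvInter (cycles.getD i []) (cycles.getD j []) then
          pvSet2 (pvSet2 adj i j) j i
        else adj) adj) adj0
  let nbr : List Nat := (List.range n_cyc).foldl (fun nbr i =>
      (List.range n_cyc).foldl (fun nbr j =>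
        if pvGetA adj i j then nbr.set i ((nbr.getD i 0) ||| (1 <<< j)) else nbr) nbr)
    (List.replicate n_cyc 0)
  let alpha0 : List Int := List.replicate (n_cyc + 1) 0
  let alpha :=
    if n_cyc ≤ 30 then
      pvBTloop nbr n_cyc 0 0 0 (alpha0.modify 0 (· + 1))
    else
      let a1 := ((alpha0.set 0 1).set 1 (n_cyc : Int)).set 2 0
      (List.range n_cyc).foldl (fun al i =>
        (List.range' (i + 1) (n_cyc - (i + 1))).foldl (fun al j =>
          if pvGetA adj i j then al else al.modify 2 (· + 1)) al) a1
  let H := (List.range alpha.length).foldl (fun h j => h + alpha.getD j 0 * 2 ^ j) 0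
  (H, alpha, cycles)

-- ===== PORT B =====

-- binary include/exclude recursion of Source B's 'go' on the sorted available list
def pvGo (nbrs : List (List Nat)) : List Nat → Nat → List Int → List Int
  | [], size, alpha => alpha.modify size (· + 1)
  | m :: rest, size, alpha =>
    pvGo nbrs (rest.filter (fun u => !((nbrs.getD m []).contains u))) (size + 1)
      (pvGo nbrs rest size alpha)
  termination_by avail => avail.length
  decreasing_by
  · simp
  · simp only [List.length_unattach]
    exact Nat.lt_succ_of_le (le_trans (List.length_filter_le _ _) (by simp))

def compute_H_and_alpha_alt (A : List (List Int)) (p : Int) : Int × List Int × List (List Int) :=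
  let n := p
  let cycles : List (List Int) :=
    (PySem.List.pyRange 3 (n + 1) 2).flatMap (fun k =>
      (pvCombos (PySem.List.pyRange 0 n 1) k.toNat).flatMap (fun subset =>
        List.replicate (pvCountHam A subset).toNat subset))
  let n_cyc := cycles.length
  let nbrs : List (List Nat) := (List.range n_cyc).map (fun i =>
      (List.range n_cyc).filter (fun j =>
        decide (j ≠ i) && pvInter (cycles.getD i []) (cycles.getD j [])))
  let alpha :=
    if n_cyc ≤ 30 then
      pvGo nbrs (List.range n_cyc) 0 (List.replicate (n_cyc + 1) 0)
    else
      let nonedges := (List.range n_cyc).foldl (fun (s : Int) (i : Nat) =>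
        s + ((n_cyc : Int) - 1 - (i : Int) -
          (((nbrs.getD i []).filter (fun u => i < u)).length : Int))) 0
      (1 : Int) :: (n_cyc : Int) :: nonedges :: List.replicate (n_cyc - 2) 0
  let H := alpha.foldr (fun a h => 2 * h + a) 0
  (H, alpha, cycles)

-- ===== PRECONDITION & SPEC =====
-- Pre_ excludes exactly the inputs on which A raises IndexError: when p ≥ 3 the k=3 case
-- reads A[a][b] for every ordered pair a,b < p, so the first p rows must exist and have ≥ p entries.
def Pre_compute_H_and_alpha (A : List (List Int)) (p : Int) : Prop :=
  p < 3 ∨ (p ≤ (A.length : Int) ∧ ∀ row ∈ A.take p.toNat, p ≤ (row.length : Int))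
instance (A : List (List Int)) (p : Int) : Decidable (Pre_compute_H_and_alpha A p) := by
  unfold Pre_compute_H_and_alpha; infer_instance

def pvWitness_compute_H_and_alpha : List (List Int) × Int :=
  ([[0, 1, 1], [1, 0, 1], [1, 1, 0]], 3)

def Spec_compute_H_and_alpha (A : List (List Int)) (p : Int) (out : Int × List Int × List (List Int)) : Prop := out = compute_H_and_alpha_alt A p
instance (A : List (List Int)) (p : Int) (out : Int × List Int × List (List Int)) : Decidable (Spec_compute_H_and_alpha A p out) := by unfold Spec_compute_H_and_alpha; infer_instance

-- ===== CLAIM (what is proved, stated in full; the proofs are below) =====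
def Claim_equal_compute_H_and_alpha : Prop := ∀ (A : List (List Int)) (p : Int), Dom_compute_H_and_alpha A p → Pre_compute_H_and_alpha A p → Spec_compute_H_and_alpha A p (compute_H_and_alpha A p)

-- ===== LEMMAS AND PROOFS =====

-- proof-only names for the components of the two ports (definitionally equal to the port bodies)
def pvCyclesA (A : List (List Int)) (p : Int) : List (List Int) :=
  (PySem.List.pyRange 3 (p + 1) 2).foldl (fun acc k =>
    (pvCombos (PySem.List.pyRange 0 p 1) k.toNat).foldl (fun acc subset =>
      acc ++ List.replicate (pvCountHam A subset).toNat subset) acc) []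

def pvCyclesB (A : List (List Int)) (p : Int) : List (List Int) :=
  (PySem.List.pyRange 3 (p + 1) 2).flatMap (fun k =>
    (pvCombos (PySem.List.pyRange 0 p 1) k.toNat).flatMap (fun subset =>
      List.replicate (pvCountHam A subset).toNat subset))

def pvAdjOf (c : List (List Int)) : List (List Bool) :=
  (List.range c.length).foldl (fun adj i =>
    (List.range' (i + 1) (c.length - (i + 1))).foldl (fun adj j =>
      if pvInter (c.getD i []) (c.getD j []) then pvSet2 (pvSet2 adj i j) j i else adj) adj)
    (List.replicate c.length (List.replicate c.length false))

def pvNbrOf (c : List (List Int)) : List Nat :=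
  (List.range c.length).foldl (fun nbr i =>
    (List.range c.length).foldl (fun nbr j =>
      if pvGetA (pvAdjOf c) i j then nbr.set i ((nbr.getD i 0) ||| (1 <<< j)) else nbr) nbr)
    (List.replicate c.length 0)

def pvNbrsOf (c : List (List Int)) : List (List Nat) :=
  (List.range c.length).map (fun i =>
    (List.range c.length).filter (fun j =>
      decide (j ≠ i) && pvInter (c.getD i []) (c.getD j [])))

def pvAlphaA (c : List (List Int)) : List Int :=
  if c.length ≤ 30 then
    pvBTloop (pvNbrOf c) c.length 0 0 0 (((List.replicate (c.length + 1) (0 : Int)).modify 0 (· + 1)))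
  else
    (List.range c.length).foldl (fun al i =>
      (List.range' (i + 1) (c.length - (i + 1))).foldl (fun al j =>
        if pvGetA (pvAdjOf c) i j then al else al.modify 2 (· + 1)) al)
      ((((List.replicate (c.length + 1) (0 : Int)).set 0 1).set 1 (c.length : Int)).set 2 0)

def pvAlphaB (c : List (List Int)) : List Int :=
  if c.length ≤ 30 then
    pvGo (pvNbrsOf c) (List.range c.length) 0 (List.replicate (c.length + 1) 0)
  else
    (1 : Int) :: (c.length : Int) ::
      ((List.range c.length).foldl (fun (s : Int) (i : Nat) =>
        s + ((c.length : Int) - 1 - (i : Int) -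
          ((((pvNbrsOf c).getD i []).filter (fun u => i < u)).length : Int))) 0) ::
      List.replicate (c.length - 2) 0

def pvHA (al : List Int) : Int := (List.range al.length).foldl (fun h j => h + al.getD j 0 * 2 ^ j) 0

def pvHB (al : List Int) : Int := al.foldr (fun a h => 2 * h + a) 0


-- apply a list of '+= 1' bumps to alpha
def pvBumps (alpha : List Int) (l : List Nat) : List Int :=
  l.foldl (fun a s => a.modify s (· + 1)) alpha

-- bump positions produced by A's backtrack loop over the available list (neighbour test N)
def posF (N : Nat → Nat → Bool) : List Nat → Nat → List Nat
  | [], _ => []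
  | w :: rest, s =>
    (s + 1) :: (posF N (rest.filter (fun u => !N w u)) (s + 1) ++ posF N rest s)
  termination_by l => l.length
  decreasing_by
  · simp only [List.length_unattach]
    exact Nat.lt_succ_of_le (le_trans (List.length_filter_le _ _) (by simp))
  · simp

-- bump positions produced by B's include/exclude recursion
def posG (N : Nat → Nat → Bool) : List Nat → Nat → List Nat
  | [], s => [s]
  | m :: rest, s => posG N rest s ++ posG N (rest.filter (fun u => !N m u)) (s + 1)
  termination_by l => l.length
  decreasing_by
  · simp
  · simp only [List.length_unattach]
    exact Nat.lt_succ_of_le (le_trans (List.length_filter_le _ _) (by simp))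

-- ---------- generic helpers ----------

theorem pv_modify_comm (l : List Int) (i j : Nat) :
    (l.modify i (· + 1)).modify j (· + 1) = (l.modify j (· + 1)).modify i (· + 1) := by
  apply List.ext_getElem
  · simp
  · intro k h1 h2
    simp only [List.getElem_modify]
    split_ifs <;> simp_all

theorem pv_modify_modify (l : List Int) (i : Nat) (f g : Int → Int) :
    (l.modify i f).modify i g = l.modify i (fun v => g (f v)) := by
  apply List.ext_getElem
  · simp
  · intro k h1 h2
    simp only [List.getElem_modify]
    split_ifs <;> simp_all

theorem pvBumps_perm (alpha : List Int) {l1 l2 : List Nat} (h : l1.Perm l2) :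
    pvBumps alpha l1 = pvBumps alpha l2 := by
  unfold pvBumps
  letI : RightCommutative (fun (a : List Int) (s : Nat) => a.modify s (· + 1)) :=
    ⟨fun b a1 a2 => pv_modify_comm b a1 a2⟩
  exact h.foldl_eq alpha

theorem pvBumps_append (alpha : List Int) (l1 l2 : List Nat) :
    pvBumps alpha (l1 ++ l2) = pvBumps (pvBumps alpha l1) l2 := List.foldl_append

theorem pv_foldl_flat {α β γ : Type} (l : List α) (g : α → List β) (f : γ → β → γ) (a : γ) :
    l.foldl (fun acc i => (g i).foldl f acc) a = (l.flatMap g).foldl f a := by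
  induction l generalizing a with
  | nil => simp
  | cons x xs ih => simp [List.flatMap_cons, List.foldl_append, ih]

theorem pv_and_bit (x u : Nat) : ((x &&& (1 <<< u)) == 0) = !x.testBit u := by
  have h1 : (1 : Nat) <<< u = 2 ^ u := by simp [Nat.shiftLeft_eq]
  rw [h1, Nat.and_two_pow]
  cases h : x.testBit u <;> simp [Nat.pow_eq_zero]

-- ---------- L1: A's backtrack loop as posF bumps ----------

theorem pvBTloop_eq (nbr : List Nat) :
    ∀ (fuel w mask size : Nat) (alpha : List Int),
      pvBTloop nbr fuel w mask size alpha =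
      pvBumps alpha (posF (fun a u => !(((nbr.getD a 0) &&& (1 <<< u)) == 0))
        ((List.range' w fuel).filter (fun u => ((mask &&& (1 <<< u)) == 0))) size) := by
  intro fuel
  induction fuel with
  | zero => intro w mask size alpha; simp [pvBTloop, posF, pvBumps]
  | succ fuel ih =>
    intro w mask size alpha
    rw [pvBTloop, List.range'_succ, List.filter_cons]
    by_cases hbit : mask &&& (1 <<< w) = 0
    · have hb : ((mask &&& (1 <<< w)) == 0) = true := by simpa using hbit
      rw [if_pos hbit, hb, if_pos rfl, posF]
      have hfil : (List.range' (w + 1) fuel).filter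
            (fun u => (((mask ||| nbr.getD w 0) &&& (1 <<< u)) == 0))
          = ((List.range' (w + 1) fuel).filter (fun u => ((mask &&& (1 <<< u)) == 0))).filter
              (fun u => !(!(((nbr.getD w 0) &&& (1 <<< u)) == 0))) := by
        rw [List.filter_filter]
        apply List.filter_congr
        intro u _
        cases hm : mask.testBit u <;> cases hn : (nbr.getD w 0).testBit u <;>
          simp [pv_and_bit, Nat.testBit_or, hm]
      rw [ih, ih, hfil]
      simp [pvBumps, List.foldl_append]
    · have hb : ((mask &&& (1 <<< w)) == 0) = false := by simpa using hbit
      rw [if_neg hbit, hb]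
      simp only [Bool.false_eq_true, if_false]
      exact ih (w + 1) mask size alpha

-- ---------- L2: B's include/exclude recursion as posG bumps ----------

theorem pvGo_eq_aux (nbrs : List (List Nat)) :
    ∀ (k : Nat) (avail : List Nat), avail.length ≤ k → ∀ (size : Nat) (alpha : List Int),
      pvGo nbrs avail size alpha =
        pvBumps alpha (posG (fun m u => (nbrs.getD m []).contains u) avail size) := by
  intro k
  induction k with
  | zero =>
    intro avail h size alpha
    have : avail = [] := List.eq_nil_of_length_eq_zero (Nat.le_zero.mp h)
    subst this
    simp [pvGo, posG, pvBumps]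
  | succ k ih =>
    intro avail h size alpha
    cases avail with
    | nil => simp [pvGo, posG, pvBumps]
    | cons m rest =>
      have h1 : rest.length ≤ k := by simpa using Nat.le_of_succ_le_succ h
      have h2 : (rest.filter (fun u => !((nbrs.getD m []).contains u))).length ≤ k :=
        le_trans (List.length_filter_le _ _) h1
      rw [pvGo, posG, ih rest h1, ih _ h2, ← pvBumps_append]

theorem pvGo_eq (nbrs : List (List Nat)) (avail : List Nat) (size : Nat) (alpha : List Int) :
    pvGo nbrs avail size alpha =
      pvBumps alpha (posG (fun m u => (nbrs.getD m []).contains u) avail size) :=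
  pvGo_eq_aux nbrs avail.length avail le_rfl size alpha

-- ---------- L3: the two bump lists are permutations ----------

theorem posG_perm_posF (N : Nat → Nat → Bool) :
    ∀ (k : Nat) (avail : List Nat), avail.length ≤ k →
      ∀ s, (posG N avail s).Perm (s :: posF N avail s) := by
  intro k
  induction k with
  | zero =>
    intro avail h s
    have : avail = [] := List.eq_nil_of_length_eq_zero (Nat.le_zero.mp h)
    subst this
    simp [posG, posF]
  | succ k ih =>
    intro avail h s
    cases avail with
    | nil => simp [posG, posF]
    | cons m rest =>
      rw [posG, posF]
      have h1 : rest.length ≤ k := by simpa using Nat.le_of_succ_le_succ h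
      have h2 : (rest.filter (fun u => !N m u)).length ≤ k :=
        le_trans (List.length_filter_le _ _) h1
      refine List.Perm.trans (List.Perm.append (ih rest h1 s) (ih _ h2 (s + 1))) ?_
      simp only [List.cons_append]
      refine List.Perm.cons _ ?_
      refine List.Perm.trans List.perm_append_comm ?_
      simp

theorem posF_congr (N1 N2 : Nat → Nat → Bool) :
    ∀ (k : Nat) (avail : List Nat), avail.length ≤ k →
      (∀ w ∈ avail, ∀ u ∈ avail, N1 w u = N2 w u) →
      ∀ s, posF N1 avail s = posF N2 avail s := by
  intro k
  induction k with
  | zero =>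
    intro avail h _ s
    have : avail = [] := List.eq_nil_of_length_eq_zero (Nat.le_zero.mp h)
    subst this; rw [posF, posF]
  | succ k ih =>
    intro avail hlen h s
    cases avail with
    | nil => rw [posF, posF]
    | cons w rest =>
      rw [posF, posF]
      have hrest : rest.length ≤ k := by simpa using Nat.le_of_succ_le_succ hlen
      have hw : w ∈ w :: rest := List.mem_cons_self
      have hfil : rest.filter (fun u => !N1 w u) = rest.filter (fun u => !N2 w u) :=
        List.filter_congr (fun u hu => by
          rw [h w hw u (List.mem_cons_of_mem _ hu)])
      have hF : posF N1 (rest.filter (fun u => !N1 w u)) (s + 1)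
          = posF N2 (rest.filter (fun u => !N2 w u)) (s + 1) := by
        rw [ih _ (le_trans (List.length_filter_le _ _) hrest)
          (fun a ha b hb => h a (List.mem_cons_of_mem _ (List.mem_of_mem_filter ha))
            b (List.mem_cons_of_mem _ (List.mem_of_mem_filter hb))) (s + 1), hfil]
      rw [hF, ih rest hrest
        (fun a ha b hb => h a (List.mem_cons_of_mem _ ha) b (List.mem_cons_of_mem _ hb)) s]

-- ---------- conflict-matrix characterisation ----------

def pvShape (adj : List (List Bool)) (n : Nat) : Prop :=
  adj.length = n ∧ ∀ i (h : i < adj.length), adj[i].length = n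

theorem pvShape_set2 {adj : List (List Bool)} {n : Nat} (hs : pvShape adj n) (i j : Nat) :
    pvShape (pvSet2 adj i j) n := by
  obtain ⟨h1, h2⟩ := hs
  constructor
  · simpa [pvSet2] using h1
  · intro a ha
    simp only [pvSet2, List.getElem_modify]
    split_ifs
    · simpa using h2 a (by simpa [pvSet2] using ha)
    · exact h2 a (by simpa [pvSet2] using ha)

theorem pvGetA_set2 {adj : List (List Bool)} {n : Nat} (hs : pvShape adj n)
    {i j a b : Nat} (_hi : i < n) (_hj : j < n) (ha : a < n) (hb : b < n) :
    pvGetA (pvSet2 adj i j) a b = ((i == a && j == b) || pvGetA adj a b) := by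
  obtain ⟨h1, h2⟩ := hs
  have ha' : a < adj.length := by omega
  have hrb : b < adj[a].length := by rw [h2 a ha']; omega
  unfold pvGetA pvSet2
  rw [List.getD_eq_getElem (adj.modify i fun row => row.set j true) [] (by simpa using ha'),
    List.getElem_modify, List.getD_eq_getElem adj [] ha']
  by_cases hia : i = a
  · subst hia
    rw [if_pos rfl,
      List.getD_eq_getElem ((adj[i]'ha').set j true) false (by simpa using hrb),
      List.getElem_set, List.getD_eq_getElem (adj[i]'ha') false hrb]
    by_cases hjb : j = b
    · subst hjb; simp
    · simp [hjb]
  · rw [if_neg hia]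
    have hf : (i == a) = false := by simpa using hia
    simp [hf]

def pvPairs (n : Nat) : List (Nat × Nat) :=
  (List.range n).flatMap (fun i => (List.range' (i + 1) (n - (i + 1))).map (fun j => (i, j)))

theorem mem_pvPairs {n i j : Nat} : (i, j) ∈ pvPairs n ↔ i < j ∧ j < n := by
  simp only [pvPairs, List.mem_flatMap, List.mem_map, List.mem_range, List.mem_range'_1,
    Prod.mk.injEq]
  constructor
  · rintro ⟨a, ha, b, ⟨hb1, hb2⟩, rfl, rfl⟩
    omega
  · rintro ⟨hij, hjn⟩
    exact ⟨i, by omega, j, ⟨by omega, by omega⟩, rfl, rfl⟩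

theorem pvGetA_foldpairs (t : Nat × Nat → Bool) (n : Nat) :
    ∀ (L : List (Nat × Nat)) (adj : List (List Bool)), pvShape adj n →
      (∀ ij ∈ L, ij.1 < n ∧ ij.2 < n) → ∀ a b, a < n → b < n →
      pvGetA (L.foldl (fun adj ij =>
          if t ij then pvSet2 (pvSet2 adj ij.1 ij.2) ij.2 ij.1 else adj) adj) a b
      = (pvGetA adj a b ||
          L.any (fun ij => t ij && ((ij.1 == a && ij.2 == b) || (ij.1 == b && ij.2 == a)))) := by
  intro L
  induction L with
  | nil => intro adj _ _ a b _ _; simp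
  | cons ij L ih =>
    intro adj hs hb a b han hbn
    obtain ⟨hij1, hij2⟩ := hb ij List.mem_cons_self
    have hbrest : ∀ kl ∈ L, kl.1 < n ∧ kl.2 < n := fun kl hkl => hb kl (List.mem_cons_of_mem _ hkl)
    rw [List.foldl_cons]
    by_cases ht : t ij
    · rw [if_pos ht,
        ih _ (pvShape_set2 (pvShape_set2 hs _ _) _ _) hbrest a b han hbn,
        pvGetA_set2 (pvShape_set2 hs _ _) hij2 hij1 han hbn,
        pvGetA_set2 hs hij1 hij2 han hbn]
      simp [List.any_cons, ht, Bool.or_assoc, Bool.or_comm, Bool.or_left_comm, Bool.and_comm]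
    · rw [if_neg ht, ih _ hs hbrest a b han hbn]
      have ht' : t ij = false := by simpa using ht
      simp [List.any_cons, ht']

theorem pv_adjfold_eq_pairs (c : List (List Int)) :
    pvAdjOf c = (pvPairs c.length).foldl (fun adj ij =>
      if pvInter (c.getD ij.1 []) (c.getD ij.2 []) then
        pvSet2 (pvSet2 adj ij.1 ij.2) ij.2 ij.1 else adj)
      (List.replicate c.length (List.replicate c.length false)) := by
  unfold pvAdjOf pvPairs
  rw [← pv_foldl_flat]
  congr 1
  funext adj i
  rw [List.foldl_map]

theorem pv_adj_char (c : List (List Int)) {a b : Nat}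
    (ha : a < c.length) (hb : b < c.length) :
    pvGetA (pvAdjOf c) a b =
      ((decide (a < b) && pvInter (c.getD a []) (c.getD b []))
        || (decide (b < a) && pvInter (c.getD b []) (c.getD a []))) := by
  rw [pv_adjfold_eq_pairs]
  have hshape : pvShape (List.replicate c.length (List.replicate c.length false)) c.length := by
    constructor
    · simp
    · intro i h; simp
  rw [pvGetA_foldpairs _ c.length _ _ hshape
    (fun ij hij => by
      have := mem_pvPairs.mp (by simpa using hij)
      omega) a b ha hb]
  have h0 : pvGetA (List.replicate c.length (List.replicate c.length false)) a b = false := by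
    unfold pvGetA
    rw [List.getD_eq_getElem (List.replicate c.length (List.replicate c.length false)) []
      (by simpa using ha), List.getElem_replicate,
      List.getD_eq_getElem (List.replicate c.length false) false (by simpa using hb),
      List.getElem_replicate]
  rw [h0, Bool.false_or]
  rcases Nat.lt_trichotomy a b with hab | hab | hab
  · have hba : ¬ b < a := by omega
    cases hI : pvInter (c.getD a []) (c.getD b []) with
    | true =>
      have hany : (pvPairs c.length).any (fun ij =>
          pvInter (c.getD ij.1 []) (c.getD ij.2 []) &&
            ((ij.1 == a && ij.2 == b) || (ij.1 == b && ij.2 == a))) = true := by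
        rw [List.any_eq_true]
        exact ⟨(a, b), mem_pvPairs.mpr ⟨hab, hb⟩, by simpa [List.getD_eq_getElem?_getD] using hI⟩
      rw [hany]; simp [hab, hba]
    | false =>
      have hany : (pvPairs c.length).any (fun ij =>
          pvInter (c.getD ij.1 []) (c.getD ij.2 []) &&
            ((ij.1 == a && ij.2 == b) || (ij.1 == b && ij.2 == a))) = false := by
        rw [List.any_eq_false]
        rintro ⟨i, j⟩ hmem
        have hm := mem_pvPairs.mp hmem
        simp only [Bool.and_eq_true, Bool.or_eq_true, beq_iff_eq, not_and]
        intro hti hor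
        rcases hor with ⟨rfl, rfl⟩ | ⟨rfl, rfl⟩
        · rw [hti] at hI; exact Bool.true_eq_false ▸ hI.symm ▸ (by simp at hI)
        · omega
      rw [hany]; simp [hab, hba]
  · have hany : (pvPairs c.length).any (fun ij =>
        pvInter (c.getD ij.1 []) (c.getD ij.2 []) &&
          ((ij.1 == a && ij.2 == b) || (ij.1 == b && ij.2 == a))) = false := by
      rw [List.any_eq_false]
      rintro ⟨i, j⟩ hmem
      have hm := mem_pvPairs.mp hmem
      simp only [Bool.and_eq_true, Bool.or_eq_true, beq_iff_eq, not_and]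
      intro hti hor
      rcases hor with ⟨rfl, rfl⟩ | ⟨rfl, rfl⟩ <;> omega
    rw [hany]
    simp [hab]
  · have hba : ¬ a < b := by omega
    cases hI : pvInter (c.getD b []) (c.getD a []) with
    | true =>
      have hany : (pvPairs c.length).any (fun ij =>
          pvInter (c.getD ij.1 []) (c.getD ij.2 []) &&
            ((ij.1 == a && ij.2 == b) || (ij.1 == b && ij.2 == a))) = true := by
        rw [List.any_eq_true]
        exact ⟨(b, a), mem_pvPairs.mpr ⟨hab, ha⟩, by simpa [List.getD_eq_getElem?_getD] using hI⟩
      rw [hany]; simp [hab, hba]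
    | false =>
      have hany : (pvPairs c.length).any (fun ij =>
          pvInter (c.getD ij.1 []) (c.getD ij.2 []) &&
            ((ij.1 == a && ij.2 == b) || (ij.1 == b && ij.2 == a))) = false := by
        rw [List.any_eq_false]
        rintro ⟨i, j⟩ hmem
        have hm := mem_pvPairs.mp hmem
        simp only [Bool.and_eq_true, Bool.or_eq_true, beq_iff_eq, not_and]
        intro hti hor
        rcases hor with ⟨rfl, rfl⟩ | ⟨rfl, rfl⟩
        · omega
        · rw [hti] at hI; simp at hI
      rw [hany]; simp [hab, hba]

theorem pvInter_comm (a b : List Int) : pvInter a b = pvInter b a := by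
  rw [Bool.eq_iff_iff]
  simp only [pvInter, List.any_eq_true, List.contains_eq_mem, decide_eq_true_eq]
  exact ⟨fun ⟨x, h1, h2⟩ => ⟨x, h2, h1⟩, fun ⟨x, h1, h2⟩ => ⟨x, h2, h1⟩⟩

-- ---------- nbr bitmask characterisation ----------

theorem pv_inner_set (P : Nat → Bool) :
    ∀ (js : List Nat) (nbr : List Nat) (i : Nat), i < nbr.length →
      js.foldl (fun nbr j => if P j then nbr.set i ((nbr.getD i 0) ||| (1 <<< j)) else nbr) nbr
      = nbr.set i (js.foldl (fun m j => if P j then m ||| (1 <<< j) else m) (nbr.getD i 0)) := by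
  intro js
  induction js with
  | nil =>
    intro nbr i hi
    simp only [List.foldl_nil]
    rw [List.getD_eq_getElem _ _ hi, List.set_getElem_self]
  | cons j js ih =>
    intro nbr i hi
    by_cases hp : P j
    · simp only [List.foldl_cons, if_pos hp]
      rw [ih _ i (by simpa using hi), List.set_set]
      congr 1
      rw [List.getD_eq_getElem _ _ (by simpa using hi), List.getElem_set, if_pos rfl]
    · simp only [List.foldl_cons, if_neg hp]
      exact ih nbr i hi

theorem pv_outer_char (G : Nat → Nat → Bool) (n : Nat) :
    ∀ (is : List Nat) (nbr0 : List Nat), is.Nodup → (∀ i ∈ is, i < nbr0.length) → ∀ w,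
      ((is.foldl (fun nbr i =>
          (List.range n).foldl (fun nbr j =>
            if G i j then nbr.set i ((nbr.getD i 0) ||| (1 <<< j)) else nbr) nbr) nbr0).getD w 0)
      = if w ∈ is then
          (List.range n).foldl (fun m j => if G w j then m ||| (1 <<< j) else m) (nbr0.getD w 0)
        else nbr0.getD w 0 := by
  intro is
  induction is with
  | nil => intro nbr0 _ _ w; simp
  | cons i is ih =>
    intro nbr0 hnd hb w
    have hi : i < nbr0.length := hb i List.mem_cons_self
    rw [List.foldl_cons, pv_inner_set _ _ _ _ hi]
    have hb' : ∀ a ∈ is,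
        a < (nbr0.set i ((List.range n).foldl
          (fun m j => if G i j then m ||| (1 <<< j) else m) (nbr0.getD i 0))).length := by
      intro a ha; simpa using hb a (List.mem_cons_of_mem _ ha)
    rw [ih _ (List.Nodup.of_cons hnd) hb' w]
    by_cases hw : w ∈ is
    · have hwi : w ≠ i := fun h => (List.nodup_cons.mp hnd).1 (h ▸ hw)
      rw [if_pos hw, if_pos (List.mem_cons_of_mem _ hw)]
      have hgd : (nbr0.set i ((List.range n).foldl
            (fun m j => if G i j then m ||| (1 <<< j) else m) (nbr0.getD i 0))).getD w 0
          = nbr0.getD w 0 := by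
        rw [List.getD_eq_getElem?_getD, List.getElem?_set,
          if_neg (by omega : ¬ i = w), ← List.getD_eq_getElem?_getD]
      rw [hgd]
    · rw [if_neg hw]
      by_cases hwi : w = i
      · subst hwi
        rw [if_pos List.mem_cons_self,
          List.getD_eq_getElem _ _ (by simpa using hi), List.getElem_set, if_pos rfl,
          List.getD_eq_getElem _ _ hi]
      · rw [if_neg (by simp [hwi, hw])]
        rw [List.getD_eq_getElem?_getD, List.getElem?_set,
          if_neg (by omega : ¬ i = w), ← List.getD_eq_getElem?_getD]

theorem pv_bitfold_testBit (P : Nat → Bool) :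
    ∀ (js : List Nat) (m0 : Nat) (u : Nat),
      ((js.foldl (fun m j => if P j then m ||| (1 <<< j) else m) m0).testBit u)
      = (m0.testBit u || (js.contains u && P u)) := by
  intro js
  induction js with
  | nil => intro m0 u; simp
  | cons j js ih =>
    intro m0 u
    have h2 : (1 <<< j).testBit u = decide (j = u) := by
      have : (1 : Nat) <<< j = 2 ^ j := by simp [Nat.shiftLeft_eq]
      rw [this, Nat.testBit_two_pow]
    by_cases hp : P j
    · rw [List.foldl_cons, if_pos hp, ih, Nat.testBit_or, h2]
      by_cases hu : u = j
      · subst hu; simp [hp]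
      · have hju : (decide (j = u)) = false := by simp; omega
        rw [hju]
        simp [hu]
    · rw [List.foldl_cons, if_neg hp, ih]
      by_cases hu : u = j
      · subst hu; simp [hp]
      · simp [hu]

theorem pv_N_eq (c : List (List Int)) (w u : Nat)
    (hw : w < c.length) (hu : u < c.length) :
    (!((((pvNbrOf c).getD w 0) &&& (1 <<< u)) == 0))
      = ((pvNbrsOf c).getD w []).contains u := by
  have hL : pvNbrOf c = (List.range c.length).foldl (fun nbr i =>
      (List.range c.length).foldl (fun nbr j =>
        if (fun i j => pvGetA (pvAdjOf c) i j) i j then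
          nbr.set i ((nbr.getD i 0) ||| (1 <<< j)) else nbr) nbr)
      (List.replicate c.length 0) := rfl
  rw [pv_and_bit, Bool.not_not, hL,
    pv_outer_char (fun i j => pvGetA (pvAdjOf c) i j) c.length (List.range c.length)
      (List.replicate c.length 0) List.nodup_range
      (fun i hi => by simpa using List.mem_range.mp hi) w,
    if_pos (List.mem_range.mpr hw)]
  have h0 : (List.replicate c.length (0 : Nat)).getD w 0 = 0 := by
    rw [List.getD_eq_getElem _ _ (by simpa using hw)]; simp
  rw [h0, pv_bitfold_testBit]
  simp only [Nat.zero_testBit, Bool.false_or]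
  have hcont : (List.range c.length).contains u = true := by
    simp [List.contains_eq_mem, List.mem_range, hu]
  rw [hcont, Bool.true_and]
  -- right-hand side
  unfold pvNbrsOf
  rw [PySem.List.getD_map_range _ _ _ _ hw]
  rw [pv_adj_char c hw hu]
  rw [Bool.eq_iff_iff]
  simp only [List.contains_eq_mem, List.mem_filter, List.mem_range, decide_eq_true_eq,
    Bool.and_eq_true, Bool.or_eq_true]
  constructor
  · rintro (⟨h1, h2⟩ | ⟨h1, h2⟩)
    · exact ⟨hu, by simp at h1 ⊢; omega, h2⟩
    · refine ⟨hu, by simp at h1 ⊢; omega, ?_⟩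
      rw [pvInter_comm]; exact h2
  · rintro ⟨-, hne, hI⟩
    have hne' : u ≠ w := by simpa using hne
    rcases Nat.lt_or_ge w u with h | h
    · exact Or.inl ⟨by simpa using h, hI⟩
    · have : u < w := by omega
      exact Or.inr ⟨by simpa using this, by rw [pvInter_comm]; exact hI⟩

-- ---------- fallback branch ----------

theorem pv_fold_modifycount {β : Type} (P : β → Bool) :
    ∀ (L : List β) (al : List Int),
      L.foldl (fun al x => if P x then al else al.modify 2 (· + 1)) al
      = al.modify 2 (· + (L.countP (fun x => !P x) : Int)) := by
  intro L
  induction L with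
  | nil =>
    intro al
    simp only [List.foldl_nil, List.countP_nil, Nat.cast_zero]
    apply List.ext_getElem
    · simp
    · intro k h1 h2
      rw [List.getElem_modify]
      split <;> simp
  | cons x L ih =>
    intro al
    by_cases hp : P x
    · rw [List.foldl_cons, if_pos hp, ih]
      try simp [hp]
    · rw [List.foldl_cons, if_neg hp, ih, pv_modify_modify]
      have : L.countP (fun x => !P x) + 1 = (x :: L).countP (fun x => !P x) := by
        simp [hp]
      rw [← this]
      congr 1
      funext v
      push_cast
      ring

theorem pv_countP_split (Q : Nat → Bool) (n i : Nat) (hi : i < n) :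
    (List.range n).countP (fun j => decide (i < j) && Q j)
      = (List.range' (i + 1) (n - (i + 1))).countP Q := by
  have hsplit : List.range n = List.range' 0 (i + 1) ++ List.range' (i + 1) (n - (i + 1)) := by
    have happ := List.range'_append (s := 0) (m := i + 1) (n := n - (i + 1)) (step := 1)
    simp only [Nat.zero_add, Nat.one_mul] at happ
    rw [List.range_eq_range', happ]
    have hnn : i + 1 + (n - (i + 1)) = n := by omega
    rw [hnn]
  rw [hsplit, List.countP_append]
  have h1 : (List.range' 0 (i + 1)).countP (fun j => decide (i < j) && Q j) = 0 := by
    rw [List.countP_eq_zero]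
    intro a ha
    have := List.mem_range'_1.mp ha
    simp only [Bool.and_eq_true, decide_eq_true_eq, not_and]
    intro h; omega
  rw [h1, Nat.zero_add]
  apply List.countP_congr
  intro a ha
  have := List.mem_range'_1.mp ha
  simp only [Bool.and_eq_true, decide_eq_true_eq]
  constructor
  · exact fun h => h.2
  · exact fun h => ⟨by omega, h⟩

theorem pv_countP_total (Q : Nat → Bool) (L : List Nat) :
    L.countP (fun j => !Q j) + L.countP Q = L.length := by
  induction L with
  | nil => simp
  | cons x L ih =>
    simp only [List.countP_cons, List.length_cons]
    by_cases h : Q x <;> simp [h] <;> omega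

-- ---------- H as Horner ----------

theorem pv_sumform (l : List Int) :
    ((List.range l.length).map (fun j => l.getD j 0 * 2 ^ j)).sum
      = l.foldr (fun a h => 2 * h + a) 0 := by
  induction l with
  | nil => simp
  | cons a l ih =>
    rw [List.length_cons, List.range_succ_eq_map, List.map_cons, List.map_map, List.sum_cons]
    have hmap : (List.range l.length).map ((fun j => (a :: l).getD j 0 * 2 ^ j) ∘ Nat.succ)
        = (List.range l.length).map (fun j => 2 * (l.getD j 0 * 2 ^ j)) := by
      apply List.map_congr_left
      intro j _
      simp only [Function.comp_apply, List.getD_cons_succ]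
      rw [pow_succ]
      ring
    rw [hmap, List.sum_map_mul_left, ih, List.foldr_cons]
    simp
    ring

theorem pv_H_eq (al : List Int) : pvHA al = pvHB al := by
  unfold pvHA pvHB
  rw [PySem.List.foldl_add _ (fun j => al.getD j 0 * 2 ^ j) 0]
  rw [pv_sumform]
  simp

-- ---------- alpha equality ----------

theorem pv_alpha_eq (c : List (List Int)) : pvAlphaA c = pvAlphaB c := by
  unfold pvAlphaA pvAlphaB
  by_cases h30 : c.length ≤ 30
  · rw [if_pos h30, if_pos h30]
    rw [pvBTloop_eq, pvGo_eq]
    have hfil : (List.range' 0 c.length).filter (fun u => (((0 : Nat) &&& (1 <<< u)) == 0))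
        = List.range c.length := by
      rw [List.filter_eq_self.mpr (fun a _ => by simp [Nat.zero_and]), ← List.range_eq_range']
    rw [hfil]
    have hperm := posG_perm_posF (fun m u => (((pvNbrsOf c).getD m []).contains u))
      (List.range c.length).length (List.range c.length) le_rfl 0
    rw [pvBumps_perm _ hperm]
    have hcongr : posF (fun a u => !((((pvNbrOf c).getD a 0) &&& (1 <<< u)) == 0))
          (List.range c.length) 0
        = posF (fun m u => (((pvNbrsOf c).getD m []).contains u)) (List.range c.length) 0 :=
      posF_congr _ _ (List.range c.length).length _ le_rfl
        (fun w hw u hu => pv_N_eq c w u (List.mem_range.mp hw) (List.mem_range.mp hu)) 0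
    rw [hcongr]
    rfl
  · rw [if_neg h30, if_neg h30]
    have hflat : (List.range c.length).foldl (fun al i =>
        (List.range' (i + 1) (c.length - (i + 1))).foldl (fun al j =>
          if pvGetA (pvAdjOf c) i j then al else al.modify 2 (· + 1)) al)
        ((((List.replicate (c.length + 1) (0 : Int)).set 0 1).set 1 (c.length : Int)).set 2 0)
      = (pvPairs c.length).foldl (fun al ij =>
          if pvGetA (pvAdjOf c) ij.1 ij.2 then al else al.modify 2 (· + 1))
        ((((List.replicate (c.length + 1) (0 : Int)).set 0 1).set 1 (c.length : Int)).set 2 0) := by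
      unfold pvPairs
      rw [← pv_foldl_flat]
      congr 1
      funext al i
      rw [List.foldl_map]
    rw [hflat, pv_fold_modifycount]
    -- count bridge: non-edges above the diagonal vs complement arithmetic on neighbour lists
    have hcnt : ((pvPairs c.length).countP (fun ij => !pvGetA (pvAdjOf c) ij.1 ij.2) : Int)
        = (List.range c.length).foldl (fun (s : Int) (i : Nat) =>
            s + ((c.length : Int) - 1 - (i : Int) -
              ((((pvNbrsOf c).getD i []).filter (fun u => decide (i < u))).length : Int))) 0 := by
      rw [PySem.List.foldl_add _ (fun (i : Nat) => ((c.length : Int) - 1 - (i : Int) -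
        ((((pvNbrsOf c).getD i []).filter (fun u => decide (i < u))).length : Int))) 0]
      unfold pvPairs
      rw [List.countP_flatMap]
      rw [Nat.cast_list_sum, List.map_map]
      rw [zero_add]
      refine congrArg List.sum (List.map_congr_left ?_)
      intro i hi
      have hin : i < c.length := List.mem_range.mp hi
      simp only [Function.comp_apply, List.countP_map]
      have hQ : (List.range' (i + 1) (c.length - (i + 1))).countP
            ((fun ij => !pvGetA (pvAdjOf c) ij.1 ij.2) ∘ (fun j => (i, j)))
          = (List.range' (i + 1) (c.length - (i + 1))).countP
            (fun j => !pvGetA (pvAdjOf c) i j) := rfl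
      rw [hQ]
      have htot := pv_countP_total (fun j => pvGetA (pvAdjOf c) i j)
        (List.range' (i + 1) (c.length - (i + 1)))
      have hlenL : (List.range' (i + 1) (c.length - (i + 1))).length = c.length - (i + 1) :=
        List.length_range'
      -- neighbours of i above the diagonal = adjacent js in (i, n)
      have hnbr : (((pvNbrsOf c).getD i []).filter (fun u => decide (i < u))).length
          = (List.range' (i + 1) (c.length - (i + 1))).countP
              (fun j => pvGetA (pvAdjOf c) i j) := by
        unfold pvNbrsOf
        rw [PySem.List.getD_map_range _ _ _ _ hin, List.filter_filter,
          ← List.countP_eq_length_filter]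
        have hstep : (List.range c.length).countP
              (fun j => decide (i < j) && (decide (j ≠ i) && pvInter (c.getD i []) (c.getD j [])))
            = (List.range c.length).countP
              (fun j => decide (i < j) && pvInter (c.getD i []) (c.getD j [])) := by
          apply List.countP_congr
          intro j _
          simp only [Bool.and_eq_true, decide_eq_true_eq]
          constructor
          · rintro ⟨h1, -, h2⟩; exact ⟨h1, h2⟩
          · rintro ⟨h1, h2⟩; exact ⟨h1, by omega, h2⟩
        rw [hstep, pv_countP_split _ _ _ hin]
        apply List.countP_congr
        intro j hj
        have hmem := List.mem_range'_1.mp hj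
        have hij : i < j := by omega
        have hjn : j < c.length := by omega
        rw [pv_adj_char c hin hjn]
        simp only [hij, decide_true, Bool.true_and, Bool.or_eq_true, Bool.and_eq_true,
          decide_eq_true_eq]
        constructor
        · exact fun h => Or.inl h
        · rintro (h | ⟨h1, h2⟩)
          · exact h
          · omega
      rw [hnbr]
      omega
    simp only [hcnt]
    -- now the explicit list shapes agree
    have hn3 : c.length + 1 = (c.length - 2) + 1 + 1 + 1 := by omega
    rw [hn3, List.replicate_succ, List.replicate_succ, List.replicate_succ]
    simp only [List.set_cons_zero, List.set_cons_succ]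
    show _ :: _ :: (0 + _) :: _ = _
    rw [zero_add]

-- ---------- cycles equality and the verdict ------------ ---------- cycles equality and the verdict ----------

theorem pv_cycles_eq (A : List (List Int)) (p : Int) : pvCyclesA A p = pvCyclesB A p := by
  unfold pvCyclesA pvCyclesB
  simp [List.flatMap_def]

-- ===== VERDICT (by name: the statement is the Claim_ definition above) =====
theorem compute_H_and_alpha_spec : Claim_equal_compute_H_and_alpha := by
  intro A p _ _
  show compute_H_and_alpha A p = compute_H_and_alpha_alt A p
  have h1 : compute_H_and_alpha A p
      = (pvHA (pvAlphaA (pvCyclesA A p)), pvAlphaA (pvCyclesA A p), pvCyclesA A p) := rfl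
  have h2 : compute_H_and_alpha_alt A p
      = (pvHB (pvAlphaB (pvCyclesB A p)), pvAlphaB (pvCyclesB A p), pvCyclesB A p) := rfl
  rw [h1, h2, pv_cycles_eq, pv_alpha_eq, pv_H_eq]
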